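-- pv_equiv track=rewrite | github.com/primaryNK/-python-programming | discrod_bot.py | reconstruct_sentence
-- ===== SOURCE A (Python) =====
-- def reconstruct_sentence(bigrams, trigrams):
--     # 시작점 (트라이그램의 첫 요소 시작)
--     start = trigrams[0][0]
--     sentence = [start]
--
--     used_bigrams = []
--     used_trigrams = []
--
--     # 이전 트라이그램 마지막 요소 이용해서 연결
--     for i in range(len(trigrams)):
--         for trigram in trigrams:
--             if trigram[0] == sentence[-1] and trigram not in used_trigrams:
--                 sentence.append(trigram[1])
--                 used_trigrams.append(trigram)
--                 break
--
--     # 이전바이그램 마지막 요소 이용해서 연결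
--     for i in range(len(bigrams)):
--         for bigram in bigrams:
--             if bigram[0] == sentence[-1] and bigram not in used_bigrams:
--                 sentence.append(bigram[1])
--                 used_bigrams.append(bigram)
--                 break
--
--     return sentence
-- ===== SOURCE B (Python) =====
-- def reconstruct_sentence(bigrams, trigrams):
--     sentence = [trigrams[0][0]]
--     for pairs in (trigrams, bigrams):
--         # index the distinct pairs once: first element -> FIFO list of seconds
--         queues = {}
--         for p in dict.fromkeys(pairs):
--             queues.setdefault(p[0], []).append(p[1])
--         pos = {}
--         last = sentence[-1]
--         for _ in pairs:
--             q = queues.get(last, [])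
--             i = pos.get(last, 0)
--             if i >= len(q):
--                 break
--             pos[last] = i + 1
--             last = q[i]
--             sentence.append(last)
--     return sentence
-- ===== Notes on version B (the rewrite author's own statement) =====
-- stated objective: faster
-- what changed: Replaced A's repeated linear scans for the first unused matching pair (with a growing used-list membership test) by a one-time index: deduplicate the pairs, group them into per-first-word FIFO queues, and pop the next unused second in O(1) per step.
import Mathlib
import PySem

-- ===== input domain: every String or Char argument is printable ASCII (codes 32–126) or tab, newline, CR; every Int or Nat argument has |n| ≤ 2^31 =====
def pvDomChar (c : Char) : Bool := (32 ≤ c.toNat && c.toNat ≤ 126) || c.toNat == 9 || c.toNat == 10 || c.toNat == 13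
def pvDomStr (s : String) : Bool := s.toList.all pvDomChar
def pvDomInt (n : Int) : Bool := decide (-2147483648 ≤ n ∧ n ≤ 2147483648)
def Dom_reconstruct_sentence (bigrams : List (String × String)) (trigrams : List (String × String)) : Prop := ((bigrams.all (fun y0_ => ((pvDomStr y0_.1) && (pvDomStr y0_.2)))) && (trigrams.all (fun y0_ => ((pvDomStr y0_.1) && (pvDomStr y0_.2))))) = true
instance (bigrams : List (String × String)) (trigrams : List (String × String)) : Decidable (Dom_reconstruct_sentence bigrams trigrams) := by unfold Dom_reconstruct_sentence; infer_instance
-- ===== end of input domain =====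

-- B replaces A's repeated rescans for the first unused matching pair by per-first-word FIFO
-- queues built once over the deduplicated pairs (objective: faster).


-- ===== PORT A =====
-- inner loop 'for gram in grams: if gram[0] == sentence[-1] and gram not in used: … break'
def pvFindA (grams : List (String × String)) (lastW : String) (used : List (String × String)) : Option (String × String) :=
  match grams with
  | [] => none
  | g :: rest => if g.1 == lastW && !(used.contains g) then some g else pvFindA rest lastW used

-- outer loop 'for i in range(len(grams))': i is unused, so it is a countdown;
-- A's sentence is always nonempty, so sentence[-1] is getLastD "".
def pvLoopA (grams : List (String × String)) : Nat → List String × List (String × String) → List String × List (String × String)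
  | 0, st => st
  | n + 1, st =>
      match pvFindA grams (st.1.getLastD "") st.2 with
      | some g => pvLoopA grams n (st.1 ++ [g.2], st.2 ++ [g])
      | none => pvLoopA grams n st

def reconstruct_sentence (bigrams : List (String × String)) (trigrams : List (String × String)) : List String :=
  match trigrams with
  | [] => []  -- trigrams[0] raises IndexError in Python; excluded by Pre_
  | t :: _ =>
      let s1 := pvLoopA trigrams trigrams.length ([t.1], [])
      let s2 := pvLoopA bigrams bigrams.length (s1.1, [])
      s2.1

-- ===== PORT B =====
-- 'for p in dict.fromkeys(pairs): queues.setdefault(p[0], []).append(p[1])'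
def pvQueuesB (pairs : List (String × String)) : PySem.Dict String (List String) :=
  (PySem.List.dedup pairs).foldl (fun d p => d.modify p.1 [] (fun q => q ++ [p.2])) PySem.Dict.empty

-- 'for _ in pairs: q = queues.get(last, []); i = pos.get(last, 0); if i >= len(q): break; …'
def pvChainB (queues : PySem.Dict String (List String)) : Nat → PySem.Dict String Nat → String → List String → List String
  | 0, _, _, sentence => sentence
  | n + 1, pos, lastW, sentence =>
      let q := queues.getD lastW []
      let i := pos.getD lastW 0
      if h : i < q.length then
        pvChainB queues n (pos.insert lastW (i + 1)) q[i] (sentence ++ [q[i]])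
      else sentence

def reconstruct_sentence_alt (bigrams : List (String × String)) (trigrams : List (String × String)) : List String :=
  match trigrams with
  | [] => []  -- trigrams[0] raises IndexError in Python; excluded by Pre_
  | t :: _ =>
      -- B's sentence is always nonempty, so 'last = sentence[-1]' is getLastD "".
      let s1 := pvChainB (pvQueuesB trigrams) trigrams.length PySem.Dict.empty ([t.1].getLastD "") [t.1]
      pvChainB (pvQueuesB bigrams) bigrams.length PySem.Dict.empty (s1.getLastD "") s1

-- ===== PRECONDITION & SPEC =====
-- Pre_ excludes only empty trigrams, on which Python A (and B alike) raises IndexError at trigrams[0].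
def Pre_reconstruct_sentence (bigrams : List (String × String)) (trigrams : List (String × String)) : Prop := trigrams ≠ []
instance (bigrams : List (String × String)) (trigrams : List (String × String)) : Decidable (Pre_reconstruct_sentence bigrams trigrams) := by unfold Pre_reconstruct_sentence; infer_instance
def pvWitness_reconstruct_sentence : (List (String × String)) × (List (String × String)) := ([("b", "c")], [("a", "b")])

def Spec_reconstruct_sentence (bigrams : List (String × String)) (trigrams : List (String × String)) (out : List String) : Prop := out = reconstruct_sentence_alt bigrams trigrams
instance (bigrams : List (String × String)) (trigrams : List (String × String)) (out : List String) : Decidable (Spec_reconstruct_sentence bigrams trigrams out) := by unfold Spec_reconstruct_sentence; infer_instance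

-- ===== CLAIM (what is proved, stated in full; the proofs are below) =====
def Claim_equal_reconstruct_sentence : Prop := ∀ (bigrams : List (String × String)) (trigrams : List (String × String)), Dom_reconstruct_sentence bigrams trigrams → Pre_reconstruct_sentence bigrams trigrams → Spec_reconstruct_sentence bigrams trigrams (reconstruct_sentence bigrams trigrams)

-- ===== LEMMAS AND PROOFS =====

-- the per-key candidate list: distinct pairs with first component k, in first-occurrence order
def pvLp (pairs : List (String × String)) (k : String) : List (String × String) :=
  (PySem.List.dedup pairs).filter (fun p => p.1 == k)

theorem pvLp_nodup (pairs : List (String × String)) (k : String) : (pvLp pairs k).Nodup :=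
  (PySem.List.nodup_dedup pairs).filter _

theorem pvLp_fst (pairs : List (String × String)) (k : String) {g : String × String}
    (h : g ∈ pvLp pairs k) : g.1 = k := by
  have := List.of_mem_filter h
  simpa using this

theorem pvQueuesB_getD (pairs : List (String × String)) (k : String) :
    (pvQueuesB pairs).getD k [] = (pvLp pairs k).map (·.2) := by
  simp [pvQueuesB, pvLp, PySem.Dict.getD_foldl_modify_append]

-- A's inner loop is find?
theorem pvFindA_eq_find? (grams : List (String × String)) (lastW : String) (used : List (String × String)) :
    pvFindA grams lastW used = grams.find? (fun g => g.1 == lastW && !(used.contains g)) := by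
  induction grams with
  | nil => rfl
  | cons g rest ih =>
      simp only [pvFindA, List.find?]
      cases hc : (g.1 == lastW && !(used.contains g)) <;> simp [ih]

theorem pv_find?_congr {α : Type} {p q : α → Bool} {l : List α}
    (h : ∀ a ∈ l, p a = q a) : l.find? p = l.find? q := by
  induction l with
  | nil => rfl
  | cons a l ih =>
      simp only [List.find?]
      rw [h a (by simp), ih (fun b hb => h b (by simp [hb]))]

-- find? skips elements on which the predicate is false, so discarding such an element is invisible
theorem find?_discard {α : Type} [BEq α] [LawfulBEq α] (p : α → Bool) (s : List α) (x : α)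
    (hx : p x = false) : (PySem.Set.discard s x).find? p = s.find? p := by
  rw [PySem.Set.discard, List.find?_filter]
  apply pv_find?_congr
  intro a _
  by_cases hax : a = x
  · subst hax; simp [hx]
  · simp [hax]

-- first-occurrence dedup preserves the first element satisfying any predicate
theorem find?_dedup {α : Type} [BEq α] [LawfulBEq α] (p : α → Bool) (l : List α) :
    (PySem.List.dedup l).find? p = l.find? p := by
  induction l with
  | nil => rfl
  | cons x xs ih =>
      rw [PySem.List.dedup_eq_ofList, PySem.Set.ofList_cons]
      cases hpx : p x with
      | true => simp [List.find?, hpx]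
      | false =>
          simp only [List.find?, hpx]
          rw [find?_discard p _ x hpx, ← PySem.List.dedup_eq_ofList, ih]

-- on a nodup list, 'first element not in the first n ones' is exactly element n
theorem find?_not_mem_take {α : Type} [BEq α] [LawfulBEq α] :
    ∀ (L : List α), L.Nodup → ∀ (U : List α) (n : Nat),
      (∀ g ∈ L, (g ∈ U ↔ g ∈ L.take n)) →
      L.find? (fun g => !(U.contains g)) = L[n]? := by
  intro L
  induction L with
  | nil => intro _ U n _; simp
  | cons x L ih =>
      intro hnd U n h
      have hx := h x (by simp)
      cases n with
      | zero =>
          have hxU : x ∉ U := by simpa using hx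
          simp [List.find?, hxU]
      | succ m =>
          have hxU : x ∈ U := hx.mpr (by simp)
          rw [List.find?_cons_of_neg (by simp [hxU])]
          have : (x :: L)[m + 1]? = L[m]? := by simp
          rw [this]
          apply ih (List.nodup_cons.mp hnd).2 U m
          intro g hg
          have hgx : g ≠ x := fun e => (List.nodup_cons.mp hnd).1 (e ▸ hg)
          have := h g (by simp [hg])
          simpa [List.take, hgx] using this

-- the invariant tying A's used-list to B's position dictionary
def pvInv (pairs : List (String × String)) (U : List (String × String))
    (pos : PySem.Dict String Nat) : Prop :=
  ∀ k, U.filter (fun g => g.1 == k) = (pvLp pairs k).take (pos.getD k 0)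

-- under the invariant, A's scan returns the pos-th distinct candidate for the current word
theorem pvFindA_char (pairs : List (String × String)) (U : List (String × String))
    (pos : PySem.Dict String Nat) (lastW : String) (hinv : pvInv pairs U pos) :
    pvFindA pairs lastW U = (pvLp pairs lastW)[pos.getD lastW 0]? := by
  rw [pvFindA_eq_find?, ← find?_dedup]
  have heq : (PySem.List.dedup pairs).find? (fun g => g.1 == lastW && !(U.contains g))
      = (pvLp pairs lastW).find? (fun g => !(U.contains g)) := by
    rw [pvLp, List.find?_filter]
    apply pv_find?_congr
    intro a _
    simp [beq_eq_decide]
  rw [heq]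
  apply find?_not_mem_take _ (pvLp_nodup pairs lastW)
  intro g hg
  have hfst : g.1 = lastW := pvLp_fst pairs lastW hg
  have := congrArg (fun l => g ∈ l) (hinv lastW)
  simp only [List.mem_filter, hfst, beq_self_eq_true, and_true, eq_iff_iff] at this
  simpa using this

-- once A's scan fails the state never changes again
theorem pvLoopA_idle (grams : List (String × String)) (st : List String × List (String × String))
    (h : pvFindA grams (st.1.getLastD "") st.2 = none) :
    ∀ n, pvLoopA grams n st = st := by
  intro n; induction n with
  | zero => rfl
  | succ m ih => simp only [pvLoopA, h]; exact ih

-- main loop correspondence: under the invariant A's scan-loop and B's queue-chain agree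
theorem pvPhase_eq (pairs : List (String × String)) :
    ∀ (fuel : Nat) (U : List (String × String)) (pos : PySem.Dict String Nat) (sentence : List String),
      pvInv pairs U pos →
      (pvLoopA pairs fuel (sentence, U)).1
        = pvChainB (pvQueuesB pairs) fuel pos (sentence.getLastD "") sentence := by
  intro fuel
  induction fuel with
  | zero => intro U pos sentence _; rfl
  | succ n ih =>
      intro U pos sentence hinv
      have hfind := pvFindA_char pairs U pos (sentence.getLastD "") hinv
      have hq := pvQueuesB_getD pairs (sentence.getLastD "")
      cases hLn : (pvLp pairs (sentence.getLastD ""))[pos.getD (sentence.getLastD "") 0]? with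
      | none =>
          have hnone : pvFindA pairs (sentence.getLastD "") U = none := hfind.trans hLn
          have hlen : (pvLp pairs (sentence.getLastD "")).length ≤ pos.getD (sentence.getLastD "") 0 := by
            by_contra hlt
            rw [List.getElem?_eq_getElem (Nat.lt_of_not_le hlt)] at hLn
            exact absurd hLn (by simp)
          rw [pvLoopA_idle pairs (sentence, U) hnone (n + 1)]
          simp only [pvChainB, hq]
          rw [dif_neg (by simp only [List.length_map]; omega)]
      | some g =>
          have hglt : pos.getD (sentence.getLastD "") 0 < (pvLp pairs (sentence.getLastD "")).length := by
            by_contra hge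
            rw [List.getElem?_eq_none (Nat.le_of_not_lt hge)] at hLn
            exact absurd hLn (by simp)
          have hgL : g ∈ pvLp pairs (sentence.getLastD "") := List.mem_of_getElem? hLn
          have hgfst : g.1 = sentence.getLastD "" := pvLp_fst _ _ hgL
          have hLi : (pvLp pairs (sentence.getLastD ""))[pos.getD (sentence.getLastD "") 0]'hglt = g := by
            have h2 := List.getElem?_eq_getElem hglt
            rw [hLn] at h2
            exact (Option.some.inj h2).symm
          have hstepA : pvLoopA pairs (n + 1) (sentence, U)
              = pvLoopA pairs n (sentence ++ [g.2], U ++ [g]) := by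
            simp only [pvLoopA, hfind.trans hLn]
          have hstepB : pvChainB (pvQueuesB pairs) (n + 1) pos (sentence.getLastD "") sentence
              = pvChainB (pvQueuesB pairs) n
                  (pos.insert (sentence.getLastD "") (pos.getD (sentence.getLastD "") 0 + 1))
                  g.2 (sentence ++ [g.2]) := by
            simp only [pvChainB, hq]
            rw [dif_pos (by simpa using hglt)]
            simp only [List.getElem_map, hLi]
          have hinv' : pvInv pairs (U ++ [g])
              (pos.insert (sentence.getLastD "") (pos.getD (sentence.getLastD "") 0 + 1)) := by
            intro k
            rw [List.filter_append, hinv k, PySem.Dict.getD_insert]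
            by_cases hk : k = sentence.getLastD ""
            · subst hk
              rw [if_pos rfl, List.take_add_one, hLn]
              have hfil : List.filter (fun g' => g'.1 == sentence.getLastD "") [g] = [g] := by
                simp [hgfst]
              rw [hfil]
              simp
            · rw [if_neg hk]
              have hfil : List.filter (fun g' => g'.1 == k) [g] = [] := by
                simp only [List.filter_cons, List.filter_nil]
                rw [hgfst, beq_false_of_ne (fun e => hk e.symm)]
                simp
              rw [hfil, List.append_nil]
          have hfin := ih (U ++ [g])
            (pos.insert (sentence.getLastD "") (pos.getD (sentence.getLastD "") 0 + 1))
            (sentence ++ [g.2]) hinv'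
          rw [hstepA, hstepB]
          simpa [List.getLastD_concat] using hfin

-- ===== VERDICT (by name: the statement is the Claim_ definition above) =====
theorem reconstruct_sentence_spec : Claim_equal_reconstruct_sentence := by
  intro bigrams trigrams _ hpre
  unfold Spec_reconstruct_sentence reconstruct_sentence reconstruct_sentence_alt
  match trigrams with
  | [] => exact absurd rfl hpre
  | t :: ts =>
      have hinv0 : ∀ pairs, pvInv pairs [] PySem.Dict.empty := by
        intro pairs k; simp [PySem.Dict.getD_empty]
      dsimp only
      rw [pvPhase_eq bigrams bigrams.length [] PySem.Dict.empty _ (hinv0 bigrams),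
        pvPhase_eq (t :: ts) (t :: ts).length [] PySem.Dict.empty [t.1] (hinv0 (t :: ts))]
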